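-- pv_equiv track=rewrite | github.com/magabrielaa/python-projects | 07-short-exercises/te1/e1.py | predicted_coins
-- ===== SOURCE A (Python) =====
-- def predicted_coins(max_per_side, guesses_to_win, seq):
--
--     num_correct_guesses = 0
--     friend_wins = False
--
--     for i, (actual, guess) in enumerate(seq):
--         if actual == guess:
--             num_correct_guesses += 1
--         if i == max_per_side and num_correct_guesses >= guesses_to_win:
--             friend_wins = True
--
--     return friend_wins
-- ===== SOURCE B (Python) =====
-- def predicted_coins(max_per_side, guesses_to_win, seq):
--     # Recursive countdown: consume one pair at a time, decrementing the index
--     # budget and the remaining guesses needed; decide at index max_per_side.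
--     if max_per_side < 0 or not seq:
--         return False
--     (actual, guess), rest = seq[0], seq[1:]
--     need = guesses_to_win - 1 if actual == guess else guesses_to_win
--     if max_per_side == 0:
--         return need <= 0
--     return predicted_coins(max_per_side - 1, need, rest)
-- ===== Notes on version B (the rewrite author's own statement) =====
-- stated objective: simpler
-- what changed: Replaces the full-sequence loop with a counter and a flag by a recursive countdown that consumes one pair at a time, decrementing both the index budget and the remaining guesses needed, deciding exactly at index max_per_side.
import Mathlib
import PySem

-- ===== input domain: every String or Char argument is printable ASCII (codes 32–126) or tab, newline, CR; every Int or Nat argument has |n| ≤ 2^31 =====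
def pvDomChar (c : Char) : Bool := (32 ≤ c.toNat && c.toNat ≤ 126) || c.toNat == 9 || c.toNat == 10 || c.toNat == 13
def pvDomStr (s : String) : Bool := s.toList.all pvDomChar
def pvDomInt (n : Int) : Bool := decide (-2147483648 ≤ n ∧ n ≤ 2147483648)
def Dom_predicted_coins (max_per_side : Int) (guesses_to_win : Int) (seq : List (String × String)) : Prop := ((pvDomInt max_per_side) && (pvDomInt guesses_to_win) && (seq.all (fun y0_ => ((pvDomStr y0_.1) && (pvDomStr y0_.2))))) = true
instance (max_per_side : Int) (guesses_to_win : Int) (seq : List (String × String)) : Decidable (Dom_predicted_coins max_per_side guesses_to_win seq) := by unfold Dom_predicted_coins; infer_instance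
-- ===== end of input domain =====

-- B replaces A's full-sequence loop (counter + flag) by a recursive countdown that
-- consumes one pair at a time, decrementing the index budget and the remaining
-- guesses needed, deciding exactly at index max_per_side (simpler decomposition).

-- ===== PORT A =====
-- loop body of A's for-loop: state = (num_correct_guesses, friend_wins)
def pcStep (max_per_side guesses_to_win : Int) (st : Int × Bool) (ia : Int × (String × String)) : Int × Bool :=
  let n := if ia.2.1 == ia.2.2 then st.1 + 1 else st.1
  let f := if ia.1 == max_per_side && decide (guesses_to_win ≤ n) then true else st.2
  (n, f)

def predicted_coins (max_per_side : Int) (guesses_to_win : Int) (seq : List (String × String)) : Bool :=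
  ((PySem.List.enumerate seq).foldl (pcStep max_per_side guesses_to_win) (0, false)).2

-- ===== PORT B =====
def predicted_coins_alt (max_per_side : Int) (guesses_to_win : Int) (seq : List (String × String)) : Bool :=
  match seq with
  | [] => false
  | (actual, guess) :: rest =>
    if max_per_side < 0 then false
    else
      let need := if actual == guess then guesses_to_win - 1 else guesses_to_win
      if max_per_side == 0 then decide (need ≤ 0)
      else predicted_coins_alt (max_per_side - 1) need rest

-- ===== PRECONDITION & SPEC =====
def Spec_predicted_coins (max_per_side : Int) (guesses_to_win : Int) (seq : List (String × String)) (out : Bool) : Prop := out = predicted_coins_alt max_per_side guesses_to_win seq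
instance (max_per_side : Int) (guesses_to_win : Int) (seq : List (String × String)) (out : Bool) : Decidable (Spec_predicted_coins max_per_side guesses_to_win seq out) := by unfold Spec_predicted_coins; infer_instance

-- ===== CLAIM (what is proved, stated in full; the proofs are below) =====
def Claim_equal_predicted_coins : Prop := ∀ (max_per_side : Int) (guesses_to_win : Int) (seq : List (String × String)), Dom_predicted_coins max_per_side guesses_to_win seq → Spec_predicted_coins max_per_side guesses_to_win seq (predicted_coins max_per_side guesses_to_win seq)

-- ===== LEMMAS AND PROOFS =====

-- Invariant of A's loop: starting at index s with count n and flag f, the final flag is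
-- f OR (max_per_side is an index of the remaining list AND the count over the prefix up
-- to and including that index reaches guesses_to_win).
theorem pcLoop_invariant (mps gtw : Int) (l : List (String × String)) :
    ∀ (s n : Int) (f : Bool),
      ((PySem.List.enumerate l s).foldl (pcStep mps gtw) (n, f)).2 =
        (f || decide ((s ≤ mps ∧ mps < s + l.length) ∧
               gtw ≤ n + ((l.take (mps - s + 1).toNat).countP (fun p => p.1 == p.2) : Int))) := by
  induction l with
  | nil =>
      intro s n f
      have h : ¬ ((s ≤ mps ∧ mps < s + (([] : List (String × String)).length : Int)) ∧
          gtw ≤ n + ((([] : List (String × String)).take (mps - s + 1).toNat).countP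
            (fun p => p.1 == p.2) : Int)) := by
        rintro ⟨⟨h1, h2⟩, -⟩; simp at h2; omega
      rw [PySem.List.enumerate_nil]
      simp only [List.foldl_nil, decide_eq_false h, Bool.or_false]
  | cons hd tl ih =>
      intro s n f
      rw [PySem.List.enumerate_cons]
      simp only [List.foldl_cons]
      rw [show pcStep mps gtw (n, f) (s, hd) =
            ((if hd.1 == hd.2 then n + 1 else n),
             (if s == mps && decide (gtw ≤ (if hd.1 == hd.2 then n + 1 else n)) then true else f)) from rfl]
      rw [ih]
      have hv : (if hd.1 == hd.2 then n + 1 else n)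
          = n + ((List.countP (fun p => p.1 == p.2) [hd] : Nat) : Int) := by
        by_cases hh : hd.1 = hd.2 <;> simp [hh]
      by_cases hcond : (s == mps && decide (gtw ≤ (if hd.1 == hd.2 then n + 1 else n))) = true
      · rw [if_pos hcond]
        simp only [Bool.and_eq_true, beq_iff_eq, decide_eq_true_eq] at hcond
        obtain ⟨hc1, hc2⟩ := hcond
        have hc2 : gtw ≤ n + ((List.countP (fun p => p.1 == p.2) [hd] : Nat) : Int) := by
          by_cases hh : hd.1 = hd.2 <;> simp [hh] at hc2 ⊢ <;> omega
        have h1 : (mps - s + 1).toNat = 1 := by omega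
        have hQ : (s ≤ mps ∧ mps < s + ((hd :: tl).length : Int)) ∧
            gtw ≤ n + (((hd :: tl).take (mps - s + 1).toNat).countP (fun p => p.1 == p.2) : Int) := by
          rw [h1, List.take_succ_cons, List.take_zero]
          exact ⟨⟨by omega, by simp only [List.length_cons]; push_cast; omega⟩, hc2⟩
        rw [decide_eq_true hQ]
        simp
      · rw [if_neg hcond]
        congr 1
        rw [decide_eq_decide, hv]
        simp only [Bool.and_eq_true, beq_iff_eq, decide_eq_true_eq] at hcond
        by_cases hm : s = mps
        · have hg : ¬ gtw ≤ n + ((List.countP (fun p => p.1 == p.2) [hd] : Nat) : Int) := by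
            intro h
            exact hcond ⟨hm, by by_cases hh : hd.1 = hd.2 <;> simp [hh] at h ⊢ <;> omega⟩
          have h1 : (mps - s + 1).toNat = 1 := by omega
          rw [h1, List.take_succ_cons, List.take_zero]
          constructor
          · rintro ⟨⟨ha, -⟩, -⟩; omega
          · rintro ⟨-, hb⟩; exact absurd hb hg
        · by_cases hlt : s < mps
          · have ht : (mps - s + 1).toNat = (mps - (s + 1) + 1).toNat + 1 := by omega
            have hone : ((List.countP (fun p => p.1 == p.2)
                  (List.take (mps - s + 1).toNat (hd :: tl)) : Nat) : Int)
                = ((List.countP (fun p => p.1 == p.2) [hd] : Nat) : Int)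
                  + ((List.countP (fun p => p.1 == p.2)
                      (List.take (mps - (s + 1) + 1).toNat tl) : Nat) : Int) := by
              rw [ht, List.take_succ_cons]
              by_cases hh : hd.1 = hd.2 <;> simp [hh]
              ring
            rw [hone]
            simp only [List.length_cons]
            constructor
            · rintro ⟨⟨h1', h2'⟩, hg⟩
              exact ⟨⟨by omega, by push_cast at h2' ⊢; omega⟩, by omega⟩
            · rintro ⟨⟨h1', h2'⟩, hg⟩
              exact ⟨⟨by omega, by push_cast at h2' ⊢; omega⟩, by omega⟩
          · constructor
            · rintro ⟨⟨h1', -⟩, -⟩; omega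
            · rintro ⟨⟨h1', -⟩, -⟩; omega

-- Characterisation of B's recursion: it returns true iff max_per_side is a valid index
-- and the count of matching pairs in the prefix of length max_per_side+1 reaches gtw.
theorem alt_char (seq : List (String × String)) :
    ∀ (mps gtw : Int),
      predicted_coins_alt mps gtw seq =
        decide ((0 ≤ mps ∧ mps < (seq.length : Int)) ∧
          gtw ≤ ((seq.take (mps + 1).toNat).countP (fun p => p.1 == p.2) : Int)) := by
  induction seq with
  | nil =>
      intro mps gtw
      have h : ¬ ((0 ≤ mps ∧ mps < (([] : List (String × String)).length : Int)) ∧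
          gtw ≤ ((([] : List (String × String)).take (mps + 1).toNat).countP (fun p => p.1 == p.2) : Int)) := by
        rintro ⟨⟨h1, h2⟩, -⟩; simp at h2; omega
      simp [predicted_coins_alt, h]
  | cons hd tl ih =>
      intro mps gtw
      obtain ⟨a, g⟩ := hd
      by_cases hneg : mps < 0
      · have h : ¬ ((0 ≤ mps ∧ mps < (((a,g) :: tl).length : Int)) ∧
            gtw ≤ ((((a,g) :: tl).take (mps + 1).toNat).countP (fun p => p.1 == p.2) : Int)) := by
          rintro ⟨⟨h1, -⟩, -⟩; omega
        simp [predicted_coins_alt, hneg, h]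
      · by_cases hz : mps = 0
        · subst hz
          simp only [predicted_coins_alt]
          rw [if_neg (by omega), if_pos (by rfl)]
          rw [show ((0 : Int) + 1).toNat = 1 from by omega, List.take_succ_cons, List.take_zero,
            List.length_cons, List.countP_cons, decide_eq_decide]
          by_cases hh : a = g
          · simp only [hh, List.countP_nil]
            simp
            all_goals (push_cast; omega)
          · simp only [List.countP_nil]
            simp [hh]
            all_goals (push_cast; omega)
        · have hpos : 0 < mps := by omega
          simp only [predicted_coins_alt]
          rw [if_neg (by omega), if_neg (by simpa using hz), ih]
          have e2 : mps - 1 + 1 = mps := by ring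
          rw [e2]
          have ht : (mps + 1).toNat = mps.toNat + 1 := by omega
          rw [ht, List.take_succ_cons, List.length_cons, List.countP_cons, decide_eq_decide]
          by_cases hh : a = g
          · simp only [hh]
            simp
            all_goals (push_cast; omega)
          · simp [hh]
            all_goals (push_cast; omega)

theorem predicted_coins_eq_alt (mps gtw : Int) (seq : List (String × String)) :
    predicted_coins mps gtw seq = predicted_coins_alt mps gtw seq := by
  unfold predicted_coins
  rw [pcLoop_invariant, alt_char]
  have e : mps - 0 + 1 = mps + 1 := by ring
  rw [e]
  simp only [Bool.false_or, zero_add]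

-- ===== VERDICT (by name: the statement is the Claim_ definition above) =====
theorem predicted_coins_spec : Claim_equal_predicted_coins := by
  intro mps gtw seq _
  exact predicted_coins_eq_alt mps gtw seq
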